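-- pv_equiv track=rewrite | github.com/Priyanshutiwari0604/VortexScan | vortex_scan.py | expand_targets
-- ===== SOURCE A (Python) =====
-- from typing import Optional, Set, List, Tuple, Dict
--
-- def expand_targets(entries: List[str], exts: List[str]) -> List[str]:
--     """Build target list with extensions"""
--     seen = set()
--     out = []
--     for e in entries:
--         candidate = e.lstrip("/")
--         if candidate not in seen:
--             seen.add(candidate)
--             out.append(candidate)
--         for ext in exts:
--             ext = ext.lstrip(".")
--             if candidate.endswith("/"):
--                 idx = candidate.rstrip("/") + f"/index.{ext}"
--                 if idx not in seen:
--                     seen.add(idx)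
--                     out.append(idx)
--             else:
--                 cand2 = f"{candidate}.{ext}"
--                 if cand2 not in seen:
--                     seen.add(cand2)
--                     out.append(cand2)
--     return out
-- ===== SOURCE B (Python) =====
-- def expand_targets(entries, exts):
--     """Build target list with extensions: emit the full candidate stream, then
--     deduplicate by repeatedly taking the head and filtering it out of the remainder
--     (no seen set)."""
--     stream = []
--     for e in entries:
--         c = e.lstrip("/")
--         stream.append(c)
--         for ext in exts:
--             x = ext.lstrip(".")
--             stream.append(c.rstrip("/") + "/index." + x if c.endswith("/") else c + "." + x)
--     out = []
--     while stream:
--         h = stream[0]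
--         out.append(h)
--         stream = [y for y in stream[1:] if y != h]
--     return out
-- ===== Notes on version B (the rewrite author's own statement) =====
-- stated objective: alternative
-- what changed: Replaces A's interleaved generate-and-dedup with a seen set by two phases: build the full candidate stream, then deduplicate with no set at all, by repeatedly taking the head of the stream and filtering all its later occurrences out of the remainder.
import Mathlib
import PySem

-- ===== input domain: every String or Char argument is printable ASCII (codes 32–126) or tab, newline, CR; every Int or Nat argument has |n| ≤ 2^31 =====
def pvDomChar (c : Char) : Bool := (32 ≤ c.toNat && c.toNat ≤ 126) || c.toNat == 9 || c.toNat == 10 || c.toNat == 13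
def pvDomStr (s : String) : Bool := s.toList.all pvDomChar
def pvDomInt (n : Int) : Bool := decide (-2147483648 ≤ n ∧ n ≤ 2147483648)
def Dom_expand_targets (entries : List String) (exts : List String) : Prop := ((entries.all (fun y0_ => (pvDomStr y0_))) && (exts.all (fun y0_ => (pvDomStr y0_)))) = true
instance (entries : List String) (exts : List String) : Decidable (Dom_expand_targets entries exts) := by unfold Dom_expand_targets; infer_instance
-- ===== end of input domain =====

-- B drops A's seen-set entirely: it first materialises the whole candidate stream, then
-- deduplicates by repeatedly taking the head and filtering its occurrences out of the
-- remainder; alternative algorithm, same results.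

-- s.lstrip(chars): drop leading characters that occur in chars (exact for these calls)
def pvLstrip (s : String) (chars : String) : String :=
  String.ofList (s.toList.dropWhile (fun c => chars.toList.contains c))

-- s.rstrip(chars): drop trailing characters that occur in chars (exact for these calls)
def pvRstrip (s : String) (chars : String) : String :=
  String.ofList ((s.toList.reverse.dropWhile (fun c => chars.toList.contains c)).reverse)

-- ===== PORT A =====
-- the body of A's `for e in entries` loop, over state (seen, out)
def pvAStep (exts : List String) (st : PySem.Set String × List String) (e : String) :
    PySem.Set String × List String :=
  let candidate := pvLstrip e "/"
  let st1 := if st.1.contains candidate then st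
             else (PySem.Set.add st.1 candidate, st.2 ++ [candidate])
  exts.foldl (fun st ext =>
    let ext := pvLstrip ext "."
    if PySem.Str.endswith candidate "/" then
      let idx := pvRstrip candidate "/" ++ "/index." ++ ext
      if st.1.contains idx then st else (PySem.Set.add st.1 idx, st.2 ++ [idx])
    else
      let cand2 := candidate ++ "." ++ ext
      if st.1.contains cand2 then st else (PySem.Set.add st.1 cand2, st.2 ++ [cand2])) st1

def expand_targets (entries : List String) (exts : List String) : List String :=
  (entries.foldl (pvAStep exts) (PySem.Set.ofList [], [])).2

-- ===== PORT B =====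
-- phase 1: the full candidate stream, built by appending as Source B's first loop does
def pvBStream (entries : List String) (exts : List String) : List String :=
  entries.foldl (fun stream e =>
    let c := pvLstrip e "/"
    exts.foldl (fun stream ext =>
      let x := pvLstrip ext "."
      stream ++ [if PySem.Str.endswith c "/" then pvRstrip c "/" ++ "/index." ++ x
                 else c ++ "." ++ x]) (stream ++ [c])) []

-- phase 2: head-and-filter deduplication (Source B's while loop; fuel = initial stream
-- length, which the loop never exhausts since each pass consumes at least the head)
def pvDedupGo : Nat → List String → List String
  | _, [] => []
  | 0, _ :: _ => []
  | n + 1, h :: rest => h :: pvDedupGo n (rest.filter (fun y => y ≠ h))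

def pvDedup (l : List String) : List String := pvDedupGo l.length l

def expand_targets_alt (entries : List String) (exts : List String) : List String :=
  pvDedup (pvBStream entries exts)

-- ===== PRECONDITION & SPEC =====
def Spec_expand_targets (entries : List String) (exts : List String) (out : List String) : Prop := out = expand_targets_alt entries exts
instance (entries : List String) (exts : List String) (out : List String) : Decidable (Spec_expand_targets entries exts out) := by unfold Spec_expand_targets; infer_instance

-- ===== CLAIM (what is proved, stated in full; the proofs are below) =====
def Claim_equal_expand_targets : Prop := ∀ (entries : List String) (exts : List String), Dom_expand_targets entries exts → Spec_expand_targets entries exts (expand_targets entries exts)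

-- ===== LEMMAS AND PROOFS =====

-- proof-only helpers: one entry's candidates, and a single seen-set dedup step
def pvCandidates (exts : List String) (e : String) : List String :=
  let c := pvLstrip e "/"
  c :: exts.map (fun ext =>
    let x := pvLstrip ext "."
    if PySem.Str.endswith c "/" then pvRstrip c "/" ++ "/index." ++ x
    else c ++ "." ++ x)

def pvDedupStep (st : PySem.Set String × List String) (x : String) :
    PySem.Set String × List String :=
  if st.1.contains x then st else (PySem.Set.add st.1 x, st.2 ++ [x])

-- A's per-entry step is exactly a seen-set dedup fold over that entry's candidates
theorem pvAStep_eq (exts : List String) (st : PySem.Set String × List String) (e : String) :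
    pvAStep exts st e = (pvCandidates exts e).foldl pvDedupStep st := by
  unfold pvAStep pvCandidates
  simp only [List.foldl_cons, List.foldl_map]
  apply PySem.List.foldl_congr_mem
  intro st' ext _
  simp only [pvDedupStep]
  split_ifs <;> rfl

-- B's stream-building fold is the flatMap of per-entry candidate lists
theorem pvBStream_eq (entries exts : List String) :
    pvBStream entries exts = entries.flatMap (pvCandidates exts) := by
  unfold pvBStream
  suffices h : ∀ acc, entries.foldl (fun stream e =>
      let c := pvLstrip e "/"
      exts.foldl (fun stream ext =>
        let x := pvLstrip ext "."
        stream ++ [if PySem.Str.endswith c "/" then pvRstrip c "/" ++ "/index." ++ x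
                   else c ++ "." ++ x]) (stream ++ [c])) acc
      = acc ++ entries.flatMap (pvCandidates exts) by
    simpa using h []
  intro acc
  induction entries generalizing acc with
  | nil => simp only [List.foldl_nil, List.flatMap_nil, List.append_nil]
  | cons e t ih =>
    simp only [List.foldl_cons, List.flatMap_cons, ih]
    rw [PySem.List.foldl_append_singleton_eq_map]
    simp [pvCandidates]
  
theorem pvDedupGo_congr (n m : Nat) (l : List String)
    (hn : l.length ≤ n) (hm : l.length ≤ m) : pvDedupGo n l = pvDedupGo m l := by
  induction n generalizing m l with
  | zero =>
    cases l with
    | nil => cases m <;> rfl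
    | cons h rest => simp at hn
  | succ n ih =>
    cases l with
    | nil => cases m <;> rfl
    | cons h rest =>
      cases m with
      | zero => simp at hm
      | succ m =>
        simp only [pvDedupGo]
        congr 1
        have := List.length_filter_le (fun y => decide (y ≠ h)) rest
        exact ih _ _ (by simp at hn; omega) (by simp at hm; omega)

theorem pvDedup_nil : pvDedup [] = [] := rfl

theorem pvDedup_cons (h : String) (rest : List String) :
    pvDedup (h :: rest) = h :: pvDedup (rest.filter (fun y => y ≠ h)) := by
  simp only [pvDedup, List.length_cons, pvDedupGo]
  congr 1
  have := List.length_filter_le (fun y => decide (y ≠ h)) rest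
  exact pvDedupGo_congr _ _ _ this (by omega)

-- the seen-set dedup fold computes head-and-filter dedup of the unseen remainder
theorem foldl_dedupStep_eq (l : List String) (s : PySem.Set String) (out : List String) :
    (l.foldl pvDedupStep (s, out)).2 = out ++ pvDedup (l.filter (fun y => !decide (y ∈ s))) := by
  induction l generalizing s out with
  | nil => simp [pvDedup_nil]
  | cons x t ih =>
    simp only [List.foldl_cons, pvDedupStep, List.filter_cons]
    by_cases hx : x ∈ s
    · have hc : s.contains x = true := by simpa using hx
      simp [hx, ih]
    · have hc : s.contains x = false := by simpa using hx
      have hadd : ∀ y : String, (y ∈ PySem.Set.add s x) ↔ (y ∈ s ∨ y = x) := by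
        intro y; simp [PySem.Set.add, hx]
      have hfil : ∀ u : List String,
          u.filter (fun y => decide (y ≠ x) && !decide (y ∈ s))
            = u.filter (fun y => !decide (y ∈ PySem.Set.add s x)) := by
        intro u
        apply List.filter_congr
        intro y _
        by_cases h1 : y = x <;> by_cases h2 : y ∈ s <;> simp [h1, h2, hadd y]
      simp only [hc, Bool.false_eq_true, if_false, ih, hx, decide_false, Bool.not_false,
        if_true, pvDedup_cons, List.filter_filter, hfil, List.append_assoc,
        List.singleton_append]

-- ===== VERDICT (by name: the statement is the Claim_ definition above) =====
theorem expand_targets_spec : Claim_equal_expand_targets := by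
  intro entries exts _
  unfold Spec_expand_targets expand_targets expand_targets_alt
  rw [pvBStream_eq]
  have hA : entries.foldl (pvAStep exts) (PySem.Set.ofList [], [])
      = (entries.flatMap (pvCandidates exts)).foldl pvDedupStep (PySem.Set.ofList [], []) := by
    rw [List.foldl_flatMap]
    apply PySem.List.foldl_congr_mem
    intro st e _
    exact pvAStep_eq exts st e
  rw [hA, foldl_dedupStep_eq]
  simp [PySem.Set.ofList]
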